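-- pv_equiv track=rewrite | github.com/zimkaa/pet-project | src/utils/inventory.py | get_dungeon_elements
-- ===== SOURCE A (Python) =====
-- from collections import defaultdict
--
-- def get_dungeon_elements(
--     elements: dict[str, int],
--     needed_elements: list[str],
--     elements_dict: dict | None = None,
-- ) -> dict[str, int]:
--     new = elements_dict if elements_dict else defaultdict(int)
--     for name in needed_elements:
--         if name in elements:
--             new[name] += elements[name]
--     return new
-- ===== SOURCE B (Python) =====
-- from collections import defaultdict, Counter
--
--
-- def get_dungeon_elements(
--     elements: dict[str, int],
--     needed_elements: list[str],
--     elements_dict: dict | None = None,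
-- ) -> dict[str, int]:
--     delta = {
--         name: cnt * elements[name]
--         for name, cnt in Counter(needed_elements).items()
--         if name in elements
--     }
--     if elements_dict:
--         for name, add in delta.items():
--             elements_dict[name] += add
--         return elements_dict
--     new = defaultdict(int)
--     new.update(delta)
--     return new
-- ===== Notes on version B (the rewrite author's own statement) =====
-- stated objective: alternative
-- what changed: B is two staged passes: it first builds a delta dict {name: count*elements[name]} from a Counter of needed_elements, then merges that delta into the target (mutating a passed truthy dict, or loading it into a fresh defaultdict), instead of A's single per-occurrence increment loop.
import Mathlib
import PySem

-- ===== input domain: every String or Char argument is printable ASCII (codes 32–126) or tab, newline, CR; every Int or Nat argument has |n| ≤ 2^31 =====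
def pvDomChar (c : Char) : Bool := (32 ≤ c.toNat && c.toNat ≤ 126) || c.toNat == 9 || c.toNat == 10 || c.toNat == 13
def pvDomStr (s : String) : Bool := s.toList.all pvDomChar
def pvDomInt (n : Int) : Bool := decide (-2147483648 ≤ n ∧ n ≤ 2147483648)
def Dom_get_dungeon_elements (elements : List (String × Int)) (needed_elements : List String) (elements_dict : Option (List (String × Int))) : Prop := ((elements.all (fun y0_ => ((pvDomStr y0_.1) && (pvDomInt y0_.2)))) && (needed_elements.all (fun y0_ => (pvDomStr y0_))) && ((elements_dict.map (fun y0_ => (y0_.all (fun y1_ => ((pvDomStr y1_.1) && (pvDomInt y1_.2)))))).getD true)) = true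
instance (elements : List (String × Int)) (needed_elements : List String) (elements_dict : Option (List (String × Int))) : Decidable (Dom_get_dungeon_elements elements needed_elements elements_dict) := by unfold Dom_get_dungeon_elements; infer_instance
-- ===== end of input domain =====

-- B builds a delta dict {name: count*elements[name]} in one staged pass and then merges it into
-- the target, instead of A's per-occurrence increment loop; same return value. Both A and B
-- mutate a passed truthy elements_dict, and the final mutated state is identical too.

-- ===== PORT A =====
-- Python's `new[name] += elements[name]` reads differently depending on the type of `new`:
-- on a defaultdict(int) a missing key counts as 0 (pvStepDefA); on a passed plain dict a
-- missing key raises KeyError (pvStepDictA; that case is excluded by Pre_ and leaves nd unchanged).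
def pvStepDefA (E : PySem.Dict String Int) (nd : PySem.Dict String Int) (name : String) : PySem.Dict String Int :=
  if E.contains name then nd.modify name 0 (· + E.getD name 0) else nd

def pvStepDictA (E : PySem.Dict String Int) (nd : PySem.Dict String Int) (name : String) : PySem.Dict String Int :=
  if E.contains name then
    match nd.get? name with
    | some cur => nd.insert name (cur + E.getD name 0)
    | none => nd
  else nd

def get_dungeon_elements (elements : List (String × Int)) (needed_elements : List String) (elements_dict : Option (List (String × Int))) : List (String × Int) :=
  let E : PySem.Dict String Int := PySem.Dict.mk elements
  match elements_dict with
  | some d =>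
      if d = [] then (needed_elements.foldl (pvStepDefA E) PySem.Dict.empty).items
      else (needed_elements.foldl (pvStepDictA E) (PySem.Dict.mk d)).items
  | none => (needed_elements.foldl (pvStepDefA E) PySem.Dict.empty).items

-- ===== PORT B =====
-- the dict comprehension over Counter(needed_elements).items() filtered by membership
def pvDelta (E : PySem.Dict String Int) (needed_elements : List String) : PySem.Dict String Int :=
  (PySem.Dict.counter needed_elements).items.foldl
    (fun d p => if E.contains p.1 then d.insert p.1 (p.2 * E.getD p.1 0) else d)
    PySem.Dict.empty

-- `elements_dict[name] += add` on the passed plain dict; missing key = KeyError in Python,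
-- excluded by Pre_ (the `none` branch leaves the dict unchanged there)
def pvMergeAdd (nd : PySem.Dict String Int) (p : String × Int) : PySem.Dict String Int :=
  match nd.get? p.1 with
  | some cur => nd.insert p.1 (cur + p.2)
  | none => nd

def get_dungeon_elements_alt (elements : List (String × Int)) (needed_elements : List String) (elements_dict : Option (List (String × Int))) : List (String × Int) :=
  let delta := pvDelta (PySem.Dict.mk elements) needed_elements
  let d0 := elements_dict.getD []
  if d0 ≠ [] then (delta.items.foldl pvMergeAdd (PySem.Dict.mk d0)).items
  else delta.items  -- `new = defaultdict(int); new.update(delta)`: updating an empty dict yields exactly delta's items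

-- ===== PRECONDITION & SPEC =====
-- Pre_ excludes exactly the inputs where Python A raises KeyError: a truthy (non-empty) plain
-- dict elements_dict was passed and some needed name present in elements is missing from it.
def Pre_get_dungeon_elements (elements : List (String × Int)) (needed_elements : List String) (elements_dict : Option (List (String × Int))) : Prop :=
  elements_dict.getD [] = [] ∨
    ∀ name ∈ needed_elements, name ∈ elements.map Prod.fst → name ∈ (elements_dict.getD []).map Prod.fst
instance (elements : List (String × Int)) (needed_elements : List String) (elements_dict : Option (List (String × Int))) : Decidable (Pre_get_dungeon_elements elements needed_elements elements_dict) := by unfold Pre_get_dungeon_elements; infer_instance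

def pvWitness_get_dungeon_elements : (List (String × Int)) × List String × (Option (List (String × Int))) :=
  ([("a", 2)], ["a", "a", "b"], some [("a", 1)])

def Spec_get_dungeon_elements (elements : List (String × Int)) (needed_elements : List String) (elements_dict : Option (List (String × Int))) (out : List (String × Int)) : Prop := out = get_dungeon_elements_alt elements needed_elements elements_dict
instance (elements : List (String × Int)) (needed_elements : List String) (elements_dict : Option (List (String × Int))) (out : List (String × Int)) : Decidable (Spec_get_dungeon_elements elements needed_elements elements_dict out) := by unfold Spec_get_dungeon_elements; infer_instance

-- ===== CLAIM (what is proved, stated in full; the proofs are below) =====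
def Claim_equal_get_dungeon_elements : Prop := ∀ (elements : List (String × Int)) (needed_elements : List String) (elements_dict : Option (List (String × Int))), Dom_get_dungeon_elements elements needed_elements elements_dict → Pre_get_dungeon_elements elements needed_elements elements_dict → Spec_get_dungeon_elements elements needed_elements elements_dict (get_dungeon_elements elements needed_elements elements_dict)

-- ===== LEMMAS AND PROOFS =====

-- proof-side step functions: A's loop regrouped per distinct name with its multiplicity
def pvStepDefB (E : PySem.Dict String Int) (nd : PySem.Dict String Int) (p : String × Int) : PySem.Dict String Int :=
  if E.contains p.1 then nd.modify p.1 0 (· + p.2 * E.getD p.1 0) else nd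

def pvStepDictB (E : PySem.Dict String Int) (nd : PySem.Dict String Int) (p : String × Int) : PySem.Dict String Int :=
  if E.contains p.1 then
    match nd.get? p.1 with
    | some cur => nd.insert p.1 (cur + p.2 * E.getD p.1 0)
    | none => nd
  else nd

-- two additions to the same key fuse into one
theorem pv_modify_add_modify_add (d : PySem.Dict String Int) (k : String) (a b : Int) :
    (d.modify k 0 (· + a)).modify k 0 (· + b) = d.modify k 0 (· + (a + b)) := by
  simp [PySem.Dict.modify, PySem.Dict.getD_insert_self, PySem.Dict.insert_insert_self, add_assoc]

theorem pv_insert_insert_comm_of_contains (d : PySem.Dict String Int) {k n : String}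
    (hne : k ≠ n) (hn : d.contains n = true) (v w : Int) :
    (d.insert k v).insert n w = (d.insert n w).insert k v := by
  have hkn : (k == n) = false := by simp [hne]
  have hnk : (n == k) = false := by simp [Ne.symm hne]
  apply PySem.Dict.ext
  cases hck : d.contains k
  · simp only [PySem.Dict.items_insert, PySem.Dict.contains_insert, hn, hck, hkn, hnk,
      Bool.or_true, Bool.or_false, if_true, List.map_map]
    simp [hne]
  · simp only [PySem.Dict.items_insert, PySem.Dict.contains_insert, hn, hck, hkn, hnk,
      Bool.or_true, if_true, List.map_map]
    refine List.map_congr_left ?_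
    intro p _
    by_cases h1 : p.1 = k
    · simp [h1, hne]
    · by_cases h2 : p.1 = n <;> simp [h1, h2, Ne.symm hne]

theorem pv_modify_comm (d : PySem.Dict String Int) {k n : String}
    (hne : k ≠ n) (hn : d.contains n = true) (a b : Int) :
    (d.modify k 0 (· + a)).modify n 0 (· + b) = (d.modify n 0 (· + b)).modify k 0 (· + a) := by
  simp only [PySem.Dict.modify, PySem.Dict.getD_insert_of_ne _ _ _ (Ne.symm hne),
    PySem.Dict.getD_insert_of_ne _ _ _ hne]
  exact pv_insert_insert_comm_of_contains d hne hn _ _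

theorem pv_foldl_modify_comm (w : String → Int) (b : Int) {n : String} :
    ∀ (L : List String) (d : PySem.Dict String Int), (∀ k ∈ L, k ≠ n) → d.contains n = true →
    (L.foldl (fun d k => d.modify k 0 (· + w k)) d).modify n 0 (· + b)
      = L.foldl (fun d k => d.modify k 0 (· + w k)) (d.modify n 0 (· + b)) := by
  intro L
  induction L with
  | nil => intro d _ _; rfl
  | cons x L ih =>
    intro d hk hn
    simp only [List.foldl_cons]
    rw [ih _ (fun k hk' => hk k (List.mem_cons_of_mem _ hk')) (by simp [PySem.Dict.contains_modify, hn]),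
      pv_modify_comm _ (hk x (List.mem_cons_self)) hn]

theorem pv_ofList_filter (P : String → Bool) (xs : List String) :
    PySem.Set.ofList (xs.filter P) = (PySem.Set.ofList xs).filter P := by
  induction xs using List.reverseRecOn with
  | nil => rfl
  | append_singleton ys n ih =>
    have hofl : ∀ (zs : List String) (z : String),
        PySem.Set.ofList (zs ++ [z]) = PySem.Set.add (PySem.Set.ofList zs) z := by
      intro zs z
      rw [PySem.Set.ofList_eq_foldl, List.foldl_append, ← PySem.Set.ofList_eq_foldl]
      rfl
    have hadd : ∀ (s : PySem.Set String) (z : String),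
        PySem.Set.add s z = if z ∈ s then s else s ++ [z] := by
      intro s z
      simp [PySem.Set.add, PySem.Set.contains]
    rw [List.filter_append, hofl]
    cases hP : P n
    · have : List.filter P [n] = [] := by simp [hP]
      rw [this, List.append_nil, hadd, ih]
      by_cases hmem : n ∈ PySem.Set.ofList ys
      · simp [hmem]
      · simp [hmem, List.filter_append, hP]
    · have : List.filter P [n] = [n] := by simp [hP]
      rw [this, hofl, hadd, hadd, ih]
      by_cases hmem : n ∈ ys
      · have h1 : n ∈ PySem.Set.ofList ys := (PySem.Set.mem_ofList ys n).mpr hmem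
        have h2 : n ∈ (PySem.Set.ofList ys).filter P := List.mem_filter.mpr ⟨h1, hP⟩
        simp [h1, h2]
      · have h1 : n ∉ PySem.Set.ofList ys := fun h => hmem ((PySem.Set.mem_ofList ys n).mp h)
        have h2 : n ∉ (PySem.Set.ofList ys).filter P := fun h => h1 (List.mem_filter.mp h).1
        simp [h1, h2, List.filter_append, hP]

theorem pv_core (v : String → Int) :
    ∀ (xs : List String) (nd : PySem.Dict String Int),
    xs.foldl (fun d x => d.modify x 0 (· + v x)) nd
      = (PySem.Set.ofList xs).foldl (fun d k => d.modify k 0 (· + (xs.count k : Int) * v k)) nd := by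
  intro xs
  induction xs using List.reverseRecOn with
  | nil => intro nd; rfl
  | append_singleton ys n ih =>
    intro nd
    have hadd : PySem.Set.ofList (ys ++ [n])
        = if n ∈ PySem.Set.ofList ys then PySem.Set.ofList ys else PySem.Set.ofList ys ++ [n] := by
      rw [PySem.Set.ofList_eq_foldl, List.foldl_append, ← PySem.Set.ofList_eq_foldl]
      simp [PySem.Set.add, PySem.Set.contains]
    have hcount : ∀ k, k ≠ n → ((ys ++ [n]).count k : Int) = (ys.count k : Int) := by
      intro k hk; simp [List.count_append, Ne.symm hk]
    have hcongr : ∀ (L : List String), (∀ x ∈ L, x ≠ n) → ∀ (init : PySem.Dict String Int),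
        L.foldl (fun d k => d.modify k 0 (· + ((ys ++ [n]).count k : Int) * v k)) init
          = L.foldl (fun d k => d.modify k 0 (· + (ys.count k : Int) * v k)) init := by
      intro L hL init
      exact PySem.List.foldl_congr_mem L _ _ init
        (fun acc x hx => by simp only [hcount x (hL x hx)])
    rw [List.foldl_append, List.foldl_cons, List.foldl_nil, ih, hadd]
    by_cases hmem : n ∈ PySem.Set.ofList ys
    · simp only [hmem, if_true]
      obtain ⟨L1, L2, hsplit⟩ := List.append_of_mem hmem
      have hnd : (PySem.Set.ofList ys).Nodup := PySem.Set.nodup_ofList ys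
      rw [hsplit] at hnd
      have hn1 : ∀ x ∈ L1, x ≠ n := by
        intro x hx h
        exact (List.disjoint_of_nodup_append hnd) (h ▸ hx) List.mem_cons_self
      have hn2 : ∀ x ∈ L2, x ≠ n := by
        intro x hx h
        have := (List.nodup_append.mp hnd).2.1
        exact (List.nodup_cons.mp this).1 (h ▸ hx)
      rw [hsplit, List.foldl_append, List.foldl_append, List.foldl_cons, List.foldl_cons,
        hcongr L1 hn1, hcongr L2 hn2]
      have hc : ((ys ++ [n]).count n : Int) * v n = (ys.count n : Int) * v n + v n := by
        simp [List.count_append]; ring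
      simp only [hc]
      rw [← pv_modify_add_modify_add,
        ← pv_foldl_modify_comm (fun k => (ys.count k : Int) * v k) (v n) L2 _ hn2
          (by simp [PySem.Dict.contains_modify])]
    · simp only [hmem, if_false]
      rw [List.foldl_append, List.foldl_cons, List.foldl_nil,
        hcongr (PySem.Set.ofList ys) (fun x hx h => hmem (h ▸ hx))]
      have hn : n ∉ ys := fun h => hmem ((PySem.Set.mem_ofList ys n).mpr h)
      have hone : ((ys ++ [n]).count n : Int) * v n = v n := by
        simp [List.count_append, List.count_eq_zero_of_not_mem hn]
      simp only [hone]

theorem pv_main_default (E : PySem.Dict String Int) (xs : List String) (nd : PySem.Dict String Int) :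
    xs.foldl (pvStepDefA E) nd = (PySem.Dict.counter xs).items.foldl (pvStepDefB E) nd := by
  have hA : pvStepDefA E
      = fun nd name => if E.contains name = true then nd.modify name 0 (· + E.getD name 0) else nd := rfl
  have hB : pvStepDefB E
      = fun nd p => if E.contains p.1 = true then nd.modify p.1 0 (· + p.2 * E.getD p.1 0) else nd := rfl
  rw [hA, hB, PySem.Dict.items_counter, List.foldl_map]
  have e1 := PySem.List.foldl_if_eq_foldl_filter (fun x => E.contains x)
    (fun (d : PySem.Dict String Int) (x : String) => d.modify x 0 (· + E.getD x 0)) xs nd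
  have e2 := PySem.List.foldl_if_eq_foldl_filter (fun k => E.contains k)
    (fun (d : PySem.Dict String Int) (k : String) => d.modify k 0 (· + (xs.count k : Int) * E.getD k 0))
    (PySem.Set.ofList xs) nd
  simp only at e1 e2 ⊢
  rw [e1, e2, pv_core (fun k => E.getD k 0) (xs.filter (fun x => E.contains x)) nd, pv_ofList_filter]
  refine PySem.List.foldl_congr_mem _ _ _ _ ?_
  intro acc x hx
  have hPx : E.contains x = true := (List.mem_filter.mp hx).2
  simp only [List.count_filter hPx]

theorem pv_dictA_eq_defA (E : PySem.Dict String Int) :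
    ∀ (xs : List String) (nd : PySem.Dict String Int),
    (∀ x ∈ xs, E.contains x = true → nd.contains x = true) →
    xs.foldl (pvStepDictA E) nd = xs.foldl (pvStepDefA E) nd := by
  intro xs
  induction xs with
  | nil => intro nd _; rfl
  | cons x xs ih =>
    intro nd h
    simp only [List.foldl_cons]
    have hstep : pvStepDictA E nd x = pvStepDefA E nd x := by
      simp only [pvStepDictA, pvStepDefA]
      cases hP : E.contains x
      · simp
      · have hc : nd.contains x = true := h x List.mem_cons_self hP
        rw [PySem.Dict.contains_eq_isSome_get?] at hc
        obtain ⟨cur, hcur⟩ := Option.isSome_iff_exists.mp hc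
        simp [hcur, PySem.Dict.modify, PySem.Dict.getD_of_get?_eq_some _ _ hcur]
    rw [hstep]
    refine ih _ ?_
    intro y hy hPy
    have := h y (List.mem_cons_of_mem _ hy) hPy
    simp only [pvStepDefA]
    cases hP : E.contains x
    · simpa using this
    · simp [PySem.Dict.contains_modify, this]

theorem pv_dictB_eq_defB (E : PySem.Dict String Int) :
    ∀ (L : List (String × Int)) (nd : PySem.Dict String Int),
    (∀ p ∈ L, E.contains p.1 = true → nd.contains p.1 = true) →
    L.foldl (pvStepDictB E) nd = L.foldl (pvStepDefB E) nd := by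
  intro L
  induction L with
  | nil => intro nd _; rfl
  | cons q L ih =>
    intro nd h
    simp only [List.foldl_cons]
    have hstep : pvStepDictB E nd q = pvStepDefB E nd q := by
      simp only [pvStepDictB, pvStepDefB]
      cases hP : E.contains q.1
      · simp
      · have hc : nd.contains q.1 = true := h q List.mem_cons_self hP
        rw [PySem.Dict.contains_eq_isSome_get?] at hc
        obtain ⟨cur, hcur⟩ := Option.isSome_iff_exists.mp hc
        simp [hcur, PySem.Dict.modify, PySem.Dict.getD_of_get?_eq_some _ _ hcur]
    rw [hstep]
    refine ih _ ?_
    intro p hp hPp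
    have := h p (List.mem_cons_of_mem _ hp) hPp
    simp only [pvStepDefB]
    cases hP : E.contains q.1
    · simpa using this
    · simp [PySem.Dict.contains_modify, this]

theorem pv_contains_mk_iff (l : List (String × Int)) (x : String) :
    (PySem.Dict.mk l).contains x = true ↔ x ∈ l.map Prod.fst := by
  rw [PySem.Dict.contains_mk, List.any_eq_true]
  constructor
  · rintro ⟨p, hp, he⟩
    exact List.mem_map.mpr ⟨p, hp, by simpa using he.symm⟩
  · rintro h
    obtain ⟨p, hp, he⟩ := List.mem_map.mp h
    exact ⟨p, hp, by simp [he]⟩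

-- building with modify over fresh distinct keys is the same as building with insert
theorem pv_defB_eq_insert (E : PySem.Dict String Int) :
    ∀ (L : List (String × Int)) (d : PySem.Dict String Int),
    (L.map Prod.fst).Nodup → (∀ p ∈ L, d.contains p.1 = false) →
    L.foldl (pvStepDefB E) d
      = L.foldl (fun d p => if E.contains p.1 then d.insert p.1 (p.2 * E.getD p.1 0) else d) d := by
  intro L
  induction L with
  | nil => intro d _ _; rfl
  | cons q L ih =>
    intro d hnd h
    simp only [List.foldl_cons]
    have hq : d.contains q.1 = false := h q List.mem_cons_self
    have hstep : pvStepDefB E d q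
        = if E.contains q.1 then d.insert q.1 (q.2 * E.getD q.1 0) else d := by
      simp only [pvStepDefB]
      cases hP : E.contains q.1
      · simp
      · simp [PySem.Dict.modify, PySem.Dict.getD_of_not_contains _ _ hq]
    rw [hstep]
    have hnd' : (L.map Prod.fst).Nodup := (List.nodup_cons.mp (by simpa using hnd)).2
    have hq' : q.1 ∉ L.map Prod.fst := (List.nodup_cons.mp (by simpa using hnd)).1
    refine ih _ hnd' ?_
    intro p hp
    have hne : (p.1 == q.1) = false := by
      simp only [beq_eq_false_iff_ne, ne_eq]
      intro he
      exact hq' (he ▸ List.mem_map.mpr ⟨p, hp, rfl⟩)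
    cases hP : E.contains q.1
    · simpa using h p (List.mem_cons_of_mem _ hp)
    · simp [PySem.Dict.contains_insert, hne, h p (List.mem_cons_of_mem _ hp)]

-- items of the insert-build over fresh distinct keys: the filtered, scaled pairs in order
theorem pv_items_insert_build (E : PySem.Dict String Int) :
    ∀ (L : List (String × Int)) (d : PySem.Dict String Int),
    (L.map Prod.fst).Nodup → (∀ p ∈ L, d.contains p.1 = false) →
    (L.foldl (fun d p => if E.contains p.1 then d.insert p.1 (p.2 * E.getD p.1 0) else d) d).items
      = d.items ++ L.filterMap (fun p => if E.contains p.1 then some (p.1, p.2 * E.getD p.1 0) else none) := by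
  intro L
  induction L with
  | nil => intro d _ _; simp
  | cons q L ih =>
    intro d hnd h
    have hq : d.contains q.1 = false := h q List.mem_cons_self
    have hnd' : (L.map Prod.fst).Nodup := (List.nodup_cons.mp (by simpa using hnd)).2
    have hq' : q.1 ∉ L.map Prod.fst := (List.nodup_cons.mp (by simpa using hnd)).1
    cases hP : E.contains q.1
    · have hPf : ¬ (E.contains q.1 = true) := by simp [hP]
      rw [List.foldl_cons, List.filterMap_cons, if_neg hPf, if_neg hPf]
      exact ih d hnd' (fun p hp => h p (List.mem_cons_of_mem _ hp))
    · rw [List.foldl_cons, List.filterMap_cons, if_pos hP, if_pos hP,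
        ih (d.insert q.1 (q.2 * E.getD q.1 0)) hnd' ?_ ,
        PySem.Dict.items_insert_of_not_contains _ _ hq, List.append_assoc]
      · simp
      · intro p hp
        have hne : (p.1 == q.1) = false := by
          simp only [beq_eq_false_iff_ne, ne_eq]
          intro he
          exact hq' (he ▸ List.mem_map.mpr ⟨p, hp, rfl⟩)
        simp [PySem.Dict.contains_insert, hne, h p (List.mem_cons_of_mem _ hp)]

-- folding over a filterMap'd list = folding the match over the original list
theorem pv_foldl_filterMap {α β γ : Type} (f : α → Option β) (g : γ → β → γ) :
    ∀ (L : List α) (init : γ),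
    (L.filterMap f).foldl g init
      = L.foldl (fun acc x => match f x with | some y => g acc y | none => acc) init := by
  intro L
  induction L with
  | nil => intro init; rfl
  | cons x L ih =>
    intro init
    simp only [List.filterMap_cons]
    cases hf : f x <;> simp [hf, ih]

theorem pv_counter_keys_nodup (xs : List String) :
    ((PySem.Dict.counter xs).items.map Prod.fst).Nodup := by
  rw [PySem.Dict.items_counter, List.map_map]
  simp [Function.comp_def]

-- delta's items merged with pvMergeAdd = the counter items folded with pvStepDictB
theorem pv_merge_delta (E : PySem.Dict String Int) (xs : List String) (nd : PySem.Dict String Int) :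
    (pvDelta E xs).items.foldl pvMergeAdd nd
      = (PySem.Dict.counter xs).items.foldl (pvStepDictB E) nd := by
  unfold pvDelta
  have he : (PySem.Dict.empty : PySem.Dict String Int).items = [] := rfl
  rw [pv_items_insert_build E _ _ (pv_counter_keys_nodup xs) (fun p _ => by simp [PySem.Dict.contains_empty]),
    he, List.nil_append, pv_foldl_filterMap]
  refine PySem.List.foldl_congr_mem _ _ _ _ ?_
  intro acc p _
  simp only [pvStepDictB, pvMergeAdd]
  cases E.contains p.1 <;> simp

-- delta's items = A's defaultdict fold's items (the falsy-elements_dict case)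
theorem pv_delta_eq_defA (E : PySem.Dict String Int) (xs : List String) :
    (xs.foldl (pvStepDefA E) PySem.Dict.empty).items = (pvDelta E xs).items := by
  rw [pv_main_default, pvDelta,
    pv_defB_eq_insert E _ _ (pv_counter_keys_nodup xs) (fun p _ => by simp [PySem.Dict.contains_empty])]

-- ===== VERDICT (by name: the statement is the Claim_ definition above) =====
theorem get_dungeon_elements_spec : Claim_equal_get_dungeon_elements := by
  intro elements needed_elements elements_dict _ hpre
  unfold Spec_get_dungeon_elements get_dungeon_elements get_dungeon_elements_alt
  cases elements_dict with
  | none =>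
    dsimp only [Option.getD_none]
    rw [if_neg (by simp)]
    exact pv_delta_eq_defA _ _
  | some d =>
    dsimp only [Option.getD_some]
    by_cases hd : d = []
    · rw [if_pos hd, if_neg (by simp [hd])]
      exact pv_delta_eq_defA _ _
    · rw [if_neg hd, if_pos hd]
      unfold Pre_get_dungeon_elements at hpre
      simp only [Option.getD_some] at hpre
      rcases hpre with hpre | hpre
      · exact absurd hpre hd
      · have h1 : ∀ x ∈ needed_elements, (PySem.Dict.mk elements).contains x = true →
            (PySem.Dict.mk d).contains x = true := by
          intro x hx hc
          exact (pv_contains_mk_iff d x).mpr (hpre x hx ((pv_contains_mk_iff elements x).mp hc))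
        have h2 : ∀ p ∈ (PySem.Dict.counter needed_elements).items,
            (PySem.Dict.mk elements).contains p.1 = true → (PySem.Dict.mk d).contains p.1 = true := by
          intro p hp hc
          rw [PySem.Dict.items_counter] at hp
          obtain ⟨k, hk, hpk⟩ := List.mem_map.mp hp
          have hkneed : k ∈ needed_elements := (PySem.Set.mem_ofList _ _).mp hk
          have hfst : p.1 = k := by rw [← hpk]
          exact h1 p.1 (hfst ▸ hkneed) hc
        rw [pv_merge_delta, pv_dictA_eq_defA _ _ _ h1, pv_dictB_eq_defB _ _ _ h2, pv_main_default]
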